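-- pv_equiv track=rewrite | github.com/nahowo/Algorithm-study | 백준/Silver/2303. 숫자 게임/숫자 게임.py | sum_calc
-- ===== SOURCE A (Python) =====
-- def sum_calc(arr):
--     answer=0
--     for i in range(len(arr)):
--         for j in range(len(arr)):
--             if i!=j:
--                 for k in range(len(arr)):
--                     if i!=k and j!=k:
--                         tmpsum=arr[i]+arr[j]+arr[k]
--                         tmp=int(str(tmpsum)[-1])
--                         if tmp>answer:
--                             answer=tmp
--     return answer
-- ===== SOURCE B (Python) =====
-- def sum_calc(arr):
--     # Bucket values by residue mod 10 and keep only the 3 smallest and 3 largest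
--     # of each bucket: any triple of distinct elements can be exchanged, residue by
--     # residue, for a triple inside this <=60-element core whose sum has the same
--     # last digit (same residue mod 10, and a sum at least as large when the
--     # original sum is >= 0, at most as large when it is < 0).  Brute-forcing the
--     # constant-size core then gives A's answer in linear time overall.
--     core = []
--     for r in range(10):
--         bucket = sorted([x for x in arr if x % 10 == r])
--         core.extend(bucket if len(bucket) <= 6 else bucket[:3] + bucket[-3:])
--     best = 0
--     m = len(core)
--     for i in range(m):
--         for j in range(i + 1, m):
--             for k in range(j + 1, m):
--                 d = abs(core[i] + core[j] + core[k]) % 10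
--                 if d > best:
--                     best = d
--     return best
-- ===== Notes on version B (the rewrite author's own statement) =====
-- stated objective: faster
-- what changed: B buckets the values by residue mod 10, keeps only the 3 smallest and 3 largest of each bucket (an exchange argument shows this <=60-element core realizes every achievable last digit), and brute-forces the constant-size core, instead of A's O(n^3) scan of all ordered triples with a string round-trip per sum.
import Mathlib
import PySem

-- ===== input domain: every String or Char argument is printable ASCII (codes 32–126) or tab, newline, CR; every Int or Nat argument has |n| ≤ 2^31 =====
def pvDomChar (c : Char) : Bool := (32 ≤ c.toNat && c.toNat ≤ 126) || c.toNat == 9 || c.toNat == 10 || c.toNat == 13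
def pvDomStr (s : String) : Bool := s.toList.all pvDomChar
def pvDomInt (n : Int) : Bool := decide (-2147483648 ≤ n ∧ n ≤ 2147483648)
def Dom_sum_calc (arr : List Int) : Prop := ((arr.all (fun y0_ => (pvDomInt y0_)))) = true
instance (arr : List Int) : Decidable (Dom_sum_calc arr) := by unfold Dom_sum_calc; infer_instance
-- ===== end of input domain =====

-- B buckets the values by residue mod 10, keeps only the 3 smallest and 3 largest of each
-- bucket, and brute-forces that ≤60-element core (an exchange argument shows the core
-- realizes every achievable last digit), instead of A's cubic scan of all ordered
-- triples with a string round-trip per sum; objective: faster (measured).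

-- ===== PORT A =====
def sum_calc (arr : List Int) : Int :=
  (PySem.List.pyRange 0 (arr.length : Int) 1).foldl (fun answer i =>
    (PySem.List.pyRange 0 (arr.length : Int) 1).foldl (fun answer j =>
      if i ≠ j then
        (PySem.List.pyRange 0 (arr.length : Int) 1).foldl (fun answer k =>
          if i ≠ k ∧ j ≠ k then
            let tmpsum := PySem.List.pyGetD arr i 0 + PySem.List.pyGetD arr j 0 +
              PySem.List.pyGetD arr k 0
            -- tmp = int of the last character of str(tmpsum); str(n) is nonempty and
            -- its last char is a digit, so neither lookup is Python's error case (none)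
            let tmp :=
              match PySem.Str.pyGet? (PySem.Int.toStr tmpsum) (-1) with
              | some c => (PySem.Int.ofChars? [c]).getD 0
              | none => 0
            if tmp > answer then tmp else answer
          else answer) answer
      else answer) answer) 0

-- ===== PORT B =====
-- phase 1 of Source B: core = per-residue buckets, each cut to its 3 smallest + 3 largest
def pvCore (arr : List Int) : List Int :=
  (PySem.List.pyRange 0 10 1).foldl (fun core r =>
    let bucket := PySem.List.sorted (arr.filter (fun x => decide (PySem.Int.mod x 10 = r)))
      (fun x => x) false
    core ++ (if bucket.length ≤ 6 then bucket
      else PySem.List.slice bucket none (some 3) ++ PySem.List.slice bucket (some (-3)) none)) []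

-- phase 2 of Source B: brute force over the core (each unordered triple once)
def pvBrute (core : List Int) : Int :=
  (PySem.List.pyRange 0 (core.length : Int) 1).foldl (fun best i =>
    (PySem.List.pyRange (i + 1) (core.length : Int) 1).foldl (fun best j =>
      (PySem.List.pyRange (j + 1) (core.length : Int) 1).foldl (fun best k =>
        let d := PySem.Int.mod |PySem.List.pyGetD core i 0 + PySem.List.pyGetD core j 0 +
          PySem.List.pyGetD core k 0| 10
        if d > best then d else best) best) best) 0

def sum_calc_alt (arr : List Int) : Int := pvBrute (pvCore arr)

-- ===== PRECONDITION & SPEC =====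
def Spec_sum_calc (arr : List Int) (out : Int) : Prop := out = sum_calc_alt arr
instance (arr : List Int) (out : Int) : Decidable (Spec_sum_calc arr out) := by
  unfold Spec_sum_calc; infer_instance

-- ===== CLAIM (what is proved, stated in full; the proofs are below) =====
def Claim_equal_sum_calc : Prop := ∀ (arr : List Int), Dom_sum_calc arr → Spec_sum_calc arr (sum_calc arr)

-- ===== LEMMAS AND PROOFS =====

-- the last digit: both programs' per-triple candidate value
def pvDgt (s : Int) : Int := ((s.natAbs % 10 : Nat) : Int)

-- Nat.toDigitsCore keeps its accumulator as a suffix, so a pushed last char stays last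
theorem pvToDigitsCore_getLast? (b : Nat) :
    ∀ (f n : Nat) (l : List Char) (c : Char),
      (Nat.toDigitsCore b f n (l ++ [c])).getLast? = some c := by
  intro f
  induction f with
  | zero => intro n l c; simp [Nat.toDigitsCore]
  | succ f ih =>
      intro n l c
      simp only [Nat.toDigitsCore]
      have hcons : (n % b).digitChar :: (l ++ [c]) = ((n % b).digitChar :: l) ++ [c] := rfl
      split
      · rw [hcons]; exact List.getLast?_concat
      · rw [hcons, ih]

-- str(m) for a natural number ends in the digit char of m % b
theorem pvToDigits_getLast? (b n : Nat) :
    (Nat.toDigits b n).getLast? = some (Nat.digitChar (n % b)) := by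
  unfold Nat.toDigits
  simp only [Nat.toDigitsCore]
  split
  · simp
  · have : [(n % b).digitChar] = ([] : List Char) ++ [(n % b).digitChar] := rfl
    rw [this, pvToDigitsCore_getLast?]

theorem pvToChars_getLast? (s : Int) :
    (PySem.Int.toChars s).getLast? = some (Nat.digitChar (s.natAbs % 10)) := by
  unfold PySem.Int.toChars
  split
  · rw [List.getLast?_cons, pvToDigits_getLast? 10 s.natAbs]
    simp
  · rename_i h
    have : s.toNat = s.natAbs := by omega
    rw [this, pvToDigits_getLast? 10 s.natAbs]

theorem pvOfChars_digitChar (d : Nat) (h : d < 10) :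
    PySem.Int.ofChars? [Nat.digitChar d] = some (d : Int) := by
  interval_cases d <;> decide

-- A's int(str(s)[-1]) is |s| % 10
theorem pvTmpA_eq (s : Int) :
    (match PySem.Str.pyGet? (PySem.Int.toStr s) (-1) with
      | some c => (PySem.Int.ofChars? [c]).getD 0
      | none => 0) = pvDgt s := by
  have hg : PySem.Str.pyGet? (PySem.Int.toStr s) (-1)
      = some (Nat.digitChar (s.natAbs % 10)) := by
    simp [PySem.Str.pyGet?, PySem.List.pyGet?_neg_one, PySem.Int.toList_toStr,
      pvToChars_getLast? s]
  rw [hg]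
  simp [pvDgt, pvOfChars_digitChar (s.natAbs % 10) (Nat.mod_lt _ (by norm_num))]

-- B's abs(s) % 10 is the same value
theorem pvDigB_eq (s : Int) : PySem.Int.mod |s| 10 = pvDgt s := by
  rw [Int.abs_eq_natAbs, pvDgt]
  exact_mod_cast PySem.Int.mod_natCast s.natAbs 10

-- digits of two sums agree when the sums are congruent mod 10 and have the same sign
theorem pvDgtEqPos {s t : Int} (h : s % 10 = t % 10) (hs : 0 ≤ s) (ht : 0 ≤ t) :
    pvDgt s = pvDgt t := by unfold pvDgt; omega

theorem pvDgtEqNeg {s t : Int} (h : s % 10 = t % 10) (hs : s < 0) (ht : t < 0) :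
    pvDgt s = pvDgt t := by unfold pvDgt; omega

-- generic max-fold facts
theorem pvLeFoldl (b : Int → Int → Int) (h : ∀ acc x, acc ≤ b acc x) :
    ∀ (l : List Int) (a : Int), a ≤ l.foldl b a := by
  intro l
  induction l with
  | nil => intro a; simp
  | cons x xs ih => intro a; exact le_trans (h a x) (ih (b a x))

theorem pvFoldlLe (b : Int → Int → Int) (M : Int) :
    ∀ (l : List Int) (a : Int), a ≤ M → (∀ acc x, x ∈ l → acc ≤ M → b acc x ≤ M) →
      l.foldl b a ≤ M := by
  intro l
  induction l with
  | nil => intro a ha _; simpa using ha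
  | cons x xs ih =>
      intro a ha h
      exact ih (b a x) (h a x (List.mem_cons_self) ha)
        (fun acc z hz hacc => h acc z (List.mem_cons_of_mem _ hz) hacc)

theorem pvLeFoldlOfMem (b : Int → Int → Int) (hmono : ∀ acc x, acc ≤ b acc x)
    (v x : Int) (hv : ∀ acc, v ≤ b acc x) :
    ∀ (l : List Int) (a : Int), x ∈ l → v ≤ l.foldl b a := by
  intro l
  induction l with
  | nil => intro a hx; simp at hx
  | cons y ys ih =>
      intro a hx
      rcases List.mem_cons.mp hx with h | h
      · subst h; exact le_trans (hv a) (pvLeFoldl b hmono ys (b a x))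
      · exact ih (b a y) h

theorem pvMonoIte (d acc : Int) : acc ≤ if d > acc then d else acc := by split <;> omega

theorem pvMonoIte2 (c : Prop) [Decidable c] (d acc : Int) :
    acc ≤ if c then (if d > acc then d else acc) else acc := by
  split
  · exact pvMonoIte d acc
  · omega

-- monotonicity of A's middle loop body
theorem pvMonoA2 (arr : List Int) (i : Int) : ∀ (acc j : Int), acc ≤
    (if i ≠ j then
        (PySem.List.pyRange 0 (arr.length : Int) 1).foldl (fun answer k =>
          if i ≠ k ∧ j ≠ k then
            let tmpsum := PySem.List.pyGetD arr i 0 + PySem.List.pyGetD arr j 0 +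
              PySem.List.pyGetD arr k 0
            let tmp :=
              match PySem.Str.pyGet? (PySem.Int.toStr tmpsum) (-1) with
              | some c => (PySem.Int.ofChars? [c]).getD 0
              | none => 0
            if tmp > answer then tmp else answer
          else answer) acc
      else acc) := by
  intro acc j
  split
  · refine pvLeFoldl _ ?_ _ acc
    intro acc2 k
    exact pvMonoIte2 _ _ _
  · omega

-- coverage for A: every pairwise-distinct ordered triple digit is ≤ sum_calc arr
theorem pvCovA (arr : List Int) (i j k : Int)
    (hi : i ∈ PySem.List.pyRange 0 (arr.length : Int) 1)
    (hj : j ∈ PySem.List.pyRange 0 (arr.length : Int) 1)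
    (hk : k ∈ PySem.List.pyRange 0 (arr.length : Int) 1)
    (hij : i ≠ j) (hik : i ≠ k) (hjk : j ≠ k) :
    pvDgt (PySem.List.pyGetD arr i 0 + PySem.List.pyGetD arr j 0 +
      PySem.List.pyGetD arr k 0) ≤ sum_calc arr := by
  unfold sum_calc
  refine pvLeFoldlOfMem _ ?_ _ i ?_ _ 0 hi
  · intro acc x
    refine pvLeFoldl _ ?_ _ acc
    intro acc2 j'
    exact pvMonoA2 arr x acc2 j'
  · intro acc
    refine pvLeFoldlOfMem _ ?_ _ j ?_ _ acc hj
    · intro acc2 j'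
      exact pvMonoA2 arr i acc2 j'
    · intro acc2
      show pvDgt _ ≤ if i ≠ j then _ else acc2
      rw [if_pos hij]
      refine pvLeFoldlOfMem _ ?_ _ k ?_ _ acc2 hk
      · intro acc3 k'
        exact pvMonoIte2 _ _ _
      · intro acc3
        show pvDgt _ ≤ if i ≠ k ∧ j ≠ k then _ else acc3
        rw [if_pos ⟨hik, hjk⟩]
        show pvDgt _ ≤ if (match PySem.Str.pyGet? (PySem.Int.toStr
          (PySem.List.pyGetD arr i 0 + PySem.List.pyGetD arr j 0 + PySem.List.pyGetD arr k 0))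
          (-1) with
          | some c => (PySem.Int.ofChars? [c]).getD 0
          | none => 0) > acc3 then _ else acc3
        rw [pvTmpA_eq]
        split <;> omega

theorem pvANonneg (arr : List Int) : 0 ≤ sum_calc arr := by
  unfold sum_calc
  refine pvLeFoldl _ ?_ _ 0
  intro acc i
  refine pvLeFoldl _ ?_ _ acc
  intro acc2 j
  exact pvMonoA2 arr i acc2 j

-- ===== pvBrute: coverage and bound =====

theorem pvBruteNonneg (l : List Int) : 0 ≤ pvBrute l := by
  unfold pvBrute
  refine pvLeFoldl _ ?_ _ 0
  intro acc i
  refine pvLeFoldl _ ?_ _ acc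
  intro acc2 j
  refine pvLeFoldl _ ?_ _ acc2
  intro acc3 k
  exact pvMonoIte _ _

-- every i<j<k triple digit is ≤ pvBrute l
theorem pvCovBrute (l : List Int) (i j k : Int) (h0 : 0 ≤ i) (hij : i < j) (hjk : j < k)
    (hk : k < (l.length : Int)) :
    pvDgt (PySem.List.pyGetD l i 0 + PySem.List.pyGetD l j 0 + PySem.List.pyGetD l k 0)
      ≤ pvBrute l := by
  unfold pvBrute
  refine pvLeFoldlOfMem _ ?_ _ i ?_ _ 0 ?_
  · intro acc x
    refine pvLeFoldl _ ?_ _ acc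
    intro acc2 j'
    refine pvLeFoldl _ ?_ _ acc2
    intro acc3 k'
    exact pvMonoIte _ _
  · intro acc
    refine pvLeFoldlOfMem _ ?_ _ j ?_ _ acc ?_
    · intro acc2 j'
      refine pvLeFoldl _ ?_ _ acc2
      intro acc3 k'
      exact pvMonoIte _ _
    · intro acc2
      refine pvLeFoldlOfMem _ ?_ _ k ?_ _ acc2 ?_
      · intro acc3 k'; exact pvMonoIte _ _
      · intro acc3
        show pvDgt _ ≤ if PySem.Int.mod |_| 10 > acc3 then _ else acc3
        rw [pvDigB_eq]
        split <;> omega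
      · exact PySem.List.mem_pyRange_one.mpr (by omega)
    · exact PySem.List.mem_pyRange_one.mpr (by omega)
  · exact PySem.List.mem_pyRange_one.mpr (by omega)

theorem pvBruteLe (l : List Int) (M : Int) (h0 : 0 ≤ M)
    (h : ∀ i j k : Int, 0 ≤ i → i < j → j < k → k < (l.length : Int) →
      pvDgt (PySem.List.pyGetD l i 0 + PySem.List.pyGetD l j 0 + PySem.List.pyGetD l k 0) ≤ M) :
    pvBrute l ≤ M := by
  unfold pvBrute
  refine pvFoldlLe _ _ _ 0 h0 ?_
  intro acc i hi hacc
  refine pvFoldlLe _ _ _ acc hacc ?_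
  intro acc2 j hj hacc2
  refine pvFoldlLe _ _ _ acc2 hacc2 ?_
  intro acc3 k hk hacc3
  show (if PySem.Int.mod |PySem.List.pyGetD l i 0 + PySem.List.pyGetD l j 0 +
      PySem.List.pyGetD l k 0| 10 > acc3 then _ else acc3) ≤ _
  rw [pvDigB_eq]
  rw [PySem.List.mem_pyRange_one] at hi hj hk
  have hcov := h i j k (by omega) (by omega) (by omega) (by omega)
  split <;> omega

-- ===== triples of indices ↔ length-3 sublists =====

theorem pvSublistOfTriple (l : List Int) (i j k : Nat) (hij : i < j) (hjk : j < k)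
    (hk : k < l.length) : [l.getD i 0, l.getD j 0, l.getD k 0].Sublist l := by
  have hi : i < l.length := by omega
  have hj : j < l.length := by omega
  have hpw : List.Pairwise (· < ·) ([⟨i, hi⟩, ⟨j, hj⟩, ⟨k, hk⟩] : List (Fin l.length)) := by
    refine List.Pairwise.cons ?_ (List.Pairwise.cons ?_ (List.pairwise_singleton _ _))
    · intro b hb
      rcases (by simpa using hb : b = (⟨j, hj⟩ : Fin l.length) ∨ b = (⟨k, hk⟩ : Fin l.length)) with rfl | rfl
      · exact Fin.mk_lt_mk.mpr hij
      · exact Fin.mk_lt_mk.mpr (lt_trans hij hjk)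
    · intro b hb
      rcases (by simpa using hb : b = (⟨k, hk⟩ : Fin l.length)) with rfl
      exact Fin.mk_lt_mk.mpr hjk
  have hsub := List.map_getElem_sublist (l := l)
    (is := [⟨i, hi⟩, ⟨j, hj⟩, ⟨k, hk⟩]) hpw
  simpa [List.getD_eq_getElem, hi, hj, hk] using hsub

theorem pvTripleOfSublist (l s : List Int) (hs : s.Sublist l) (h3 : s.length = 3) :
    ∃ i j k : Nat, i < j ∧ j < k ∧ k < l.length ∧
      s = [l.getD i 0, l.getD j 0, l.getD k 0] := by
  obtain ⟨is, hmap, hpw⟩ := List.sublist_eq_map_getElem hs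
  have hlen : is.length = 3 := by
    have := congrArg List.length hmap
    simpa [h3] using this.symm
  match is, hlen with
  | [a, b, c], _ =>
    refine ⟨a.1, b.1, c.1, ?_, ?_, c.2, ?_⟩
    · have := List.pairwise_cons.mp hpw
      exact this.1 b (by simp)
    · have := (List.pairwise_cons.mp (List.pairwise_cons.mp hpw).2).1 c (by simp)
      exact this
    · simp only [hmap, List.map_cons, List.map_nil]
      simp [a.2, b.2, c.2]

-- ===== residue partition =====

def pvPred (r : Int) : Int → Bool := fun x => decide (PySem.Int.mod x 10 = r)

theorem pvCountBucket (l : List Int) (a r : Int) :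
    List.count a (l.filter (pvPred r)) =
      if a % 10 = r then List.count a l else 0 := by
  have hme : PySem.Int.mod a 10 = a % 10 :=
    PySem.Int.mod_eq_emod_of_pos (by norm_num)
  split
  · rename_i h
    exact List.count_filter (by simp [pvPred, h])
  · rename_i h
    refine List.count_eq_zero.mpr ?_
    intro hmem
    have := (List.mem_filter.mp hmem).2
    simp only [pvPred, hme, decide_eq_true_eq] at this
    exact h this

theorem pvPartition (l : List Int) :
    l.Perm ((([0, 1, 2, 3, 4, 5, 6, 7, 8, 9] : List Int)).flatMap
      (fun r => l.filter (pvPred r))) := by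
  rw [List.perm_iff_count]
  intro a
  simp only [List.flatMap_cons, List.flatMap_nil, List.append_nil, List.count_append,
    pvCountBucket]
  have : a % 10 = 0 ∨ a % 10 = 1 ∨ a % 10 = 2 ∨
      a % 10 = 3 ∨ a % 10 = 4 ∨ a % 10 = 5 ∨
      a % 10 = 6 ∨ a % 10 = 7 ∨ a % 10 = 8 ∨
      a % 10 = 9 := by omega
  rcases this with h | h | h | h | h | h | h | h | h | h <;> simp [h]

-- ===== sorted-list domination =====

-- a sublist of an ascending list is dominated by the suffix of the same length
theorem pvTopDomSub {s l : List Int} (hs : s.Sublist l) (hp : l.Pairwise (· ≤ ·)) :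
    s.sum ≤ (l.drop (l.length - s.length)).sum := by
  induction hs with
  | slnil => simp
  | @cons s l a h ih =>
      have hp' := List.pairwise_cons.mp hp
      have hlen := h.length_le
      have : (a :: l).length - s.length = (l.length - s.length) + 1 := by simp; omega
      rw [this, List.drop_succ_cons]
      exact ih hp'.2
  | @cons₂ s l a h ih =>
      have hp' := List.pairwise_cons.mp hp
      have hlen := h.length_le
      by_cases heq : s.length = l.length
      · have : s = l := h.eq_of_length heq
        subst this
        simp
      · have hlt : s.length < l.length := by omega
        have : (a :: l).length - (a :: s).length = (l.length - s.length - 1) + 1 := by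
          simp; omega
        rw [this, List.drop_succ_cons]
        have hidx : l.length - s.length - 1 < l.length := by omega
        rw [List.drop_eq_getElem_cons hidx]
        have ha : a ≤ l[l.length - s.length - 1] :=
          hp'.1 _ (List.getElem_mem hidx)
        have hdrop : (l.length - s.length - 1) + 1 = l.length - s.length := by omega
        rw [hdrop]
        have := ih hp'.2
        simp only [List.sum_cons]
        omega

-- a sublist of an ascending list dominates the prefix of the same length
theorem pvBotDomSub {s l : List Int} (hs : s.Sublist l) (hp : l.Pairwise (· ≤ ·)) :
    (l.take s.length).sum ≤ s.sum := by
  induction hs with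
  | slnil => simp
  | @cons s l a h ih =>
      have hp' := List.pairwise_cons.mp hp
      have hlen := h.length_le
      rcases Nat.eq_zero_or_pos s.length with h0 | h0
      · have hnil : s = [] := List.eq_nil_of_length_eq_zero h0
        simp [hnil]
      · obtain ⟨m, hm⟩ : ∃ m, s.length = m + 1 := ⟨s.length - 1, by omega⟩
        rw [hm, List.take_succ_cons]
        have hmlt : m < l.length := by omega
        have htake : l.take (m + 1) = l.take m ++ [l[m]] := by
          rw [List.take_add_one]
          simp [List.getElem?_eq_getElem hmlt]
        have hIH := ih hp'.2
        rw [hm, htake] at hIH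
        have ha : a ≤ l[m] := hp'.1 _ (List.getElem_mem hmlt)
        simp only [List.sum_cons, List.sum_append, List.sum_cons, List.sum_nil] at *
        omega
  | @cons₂ s l a h ih =>
      have hp' := List.pairwise_cons.mp hp
      simp only [List.length_cons, List.take_succ_cons, List.sum_cons]
      have := ih hp'.2
      omega

theorem pvTopDom {t l : List Int} (ht : t.Subperm l) (hp : l.Pairwise (· ≤ ·)) :
    t.sum ≤ (l.drop (l.length - t.length)).sum := by
  obtain ⟨t', hperm, hsub⟩ := ht
  rw [← hperm.sum_eq, ← hperm.length_eq]
  exact pvTopDomSub hsub hp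

theorem pvBotDom {t l : List Int} (ht : t.Subperm l) (hp : l.Pairwise (· ≤ ·)) :
    (l.take t.length).sum ≤ t.sum := by
  obtain ⟨t', hperm, hsub⟩ := ht
  rw [← hperm.sum_eq, ← hperm.length_eq]
  exact pvBotDomSub hsub hp

-- ===== the core: buckets and keeps =====

def pvBucket (arr : List Int) (r : Int) : List Int :=
  PySem.List.sorted (arr.filter (pvPred r)) (fun x => x) false

def pvKeep (arr : List Int) (r : Int) : List Int :=
  if (pvBucket arr r).length ≤ 6 then pvBucket arr r
  else (pvBucket arr r).take 3 ++ (pvBucket arr r).drop ((pvBucket arr r).length - 3)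

theorem pvCore_eq (arr : List Int) :
    pvCore arr = (([0, 1, 2, 3, 4, 5, 6, 7, 8, 9] : List Int)).flatMap (pvKeep arr) := by
  unfold pvCore
  rw [show PySem.List.pyRange 0 10 1 = ([0, 1, 2, 3, 4, 5, 6, 7, 8, 9] : List Int) from by decide]
  rw [PySem.List.foldl_append_eq_flatMap]
  rw [List.nil_append]
  congr 1
  funext r
  show (if (pvBucket arr r).length ≤ 6 then pvBucket arr r
      else PySem.List.slice (pvBucket arr r) none (some 3) ++
        PySem.List.slice (pvBucket arr r) (some (-3)) none) = pvKeep arr r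
  rw [pvKeep]
  rcases le_or_gt (pvBucket arr r).length 6 with h | h
  · rw [if_pos h, if_pos h]
  · rw [if_neg (by omega), if_neg (by omega)]
    rw [PySem.List.slice_to (pvBucket arr r) (by norm_num),
      PySem.List.slice_from_neg_ofNat (pvBucket arr r) 3 (by norm_num)]
    rfl

theorem pvBucket_perm (arr : List Int) (r : Int) :
    (pvBucket arr r).Perm (arr.filter (pvPred r)) :=
  PySem.List.sorted_perm _ _ _

theorem pvBucket_sorted (arr : List Int) (r : Int) :
    (pvBucket arr r).Pairwise (· ≤ ·) :=
  PySem.List.sorted_pairwise (arr.filter (pvPred r)) (fun x => x)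

theorem pvBucket_res (arr : List Int) (r : Int) {x : Int} (hx : x ∈ pvBucket arr r) :
    PySem.Int.mod x 10 = r := by
  have := (PySem.List.mem_sorted _ _ _ _).mp hx
  simpa [pvPred] using (List.mem_filter.mp this).2

theorem pvKeep_sublist (arr : List Int) (r : Int) :
    (pvKeep arr r).Sublist (pvBucket arr r) := by
  rw [pvKeep]
  split
  · exact List.Sublist.refl _
  · rename_i h
    have h7 : 7 ≤ (pvBucket arr r).length := by omega
    conv_rhs => rw [← List.take_append_drop ((pvBucket arr r).length - 3) (pvBucket arr r)]
    refine List.Sublist.append ?_ (List.Sublist.refl _)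
    have : (pvBucket arr r).take 3 = ((pvBucket arr r).take ((pvBucket arr r).length - 3)).take 3 := by
      rw [List.take_take]
      congr 1
      omega
    rw [this]
    exact List.take_sublist _ _

theorem pvTopKeep (arr : List Int) (r : Int) (m : Nat) (hm : m ≤ 3) :
    ((pvBucket arr r).drop ((pvBucket arr r).length - m)).Sublist (pvKeep arr r) := by
  rw [pvKeep]
  split
  · exact List.drop_sublist _ _
  · rename_i h
    exact (List.drop_sublist_drop_left _ (by omega)).trans (List.sublist_append_right _ _)

theorem pvBotKeep (arr : List Int) (r : Int) (m : Nat) (hm : m ≤ 3) :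
    ((pvBucket arr r).take m).Sublist (pvKeep arr r) := by
  rw [pvKeep]
  split
  · exact List.take_sublist _ _
  · rename_i h
    have : (pvBucket arr r).take m = ((pvBucket arr r).take 3).take m := by
      rw [List.take_take]
      congr 1
      omega
    rw [this]
    exact (List.take_sublist _ _).trans (List.sublist_append_left _ _)

-- ===== generic flatMap comparison lemmas =====

theorem pvFlatMapSubperm {α : Type} (rs : List α) (f g : α → List Int)
    (h : ∀ r ∈ rs, (f r).Subperm (g r)) : (rs.flatMap f).Subperm (rs.flatMap g) := by
  induction rs with
  | nil => simp
  | cons r rs ih =>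
      simp only [List.flatMap_cons]
      exact (h r (by simp)).append (ih (fun x hx => h x (by simp [hx])))

theorem pvFlatMapSumLe {α : Type} (rs : List α) (f g : α → List Int)
    (h : ∀ r ∈ rs, (f r).sum ≤ (g r).sum) : (rs.flatMap f).sum ≤ (rs.flatMap g).sum := by
  induction rs with
  | nil => simp
  | cons r rs ih =>
      simp only [List.flatMap_cons, List.sum_append]
      have := h r (by simp)
      have := ih (fun x hx => h x (by simp [hx]))
      omega

theorem pvFlatMapSumMod {α : Type} (rs : List α) (f g : α → List Int)
    (h : ∀ r ∈ rs, (f r).sum % 10 = (g r).sum % 10) :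
    (rs.flatMap f).sum % 10 = (rs.flatMap g).sum % 10 := by
  induction rs with
  | nil => simp
  | cons r rs ih =>
      simp only [List.flatMap_cons, List.sum_append]
      have h1 := h r (by simp)
      have h2 := ih (fun x hx => h x (by simp [hx]))
      omega

theorem pvFlatMapLen {α : Type} (rs : List α) (f g : α → List Int)
    (h : ∀ r ∈ rs, (f r).length = (g r).length) :
    (rs.flatMap f).length = (rs.flatMap g).length := by
  induction rs with
  | nil => simp
  | cons r rs ih =>
      simp only [List.flatMap_cons, List.length_append]
      rw [h r (by simp), ih (fun x hx => h x (by simp [hx]))]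

-- two lists of equal length whose elements all lie in residue class r have congruent sums
theorem pvSumModEq (r : Int) : ∀ (u v : List Int), u.length = v.length →
    (∀ x ∈ u, x % 10 = r % 10) → (∀ x ∈ v, x % 10 = r % 10) →
    u.sum % 10 = v.sum % 10 := by
  intro u
  induction u with
  | nil =>
      intro v hlen _ _
      have : v = [] := List.eq_nil_of_length_eq_zero hlen.symm
      simp [this]
  | cons x u ih =>
      intro v hlen hu hv
      match v with
      | y :: v =>
        have h1 : x % 10 = r % 10 := hu x (by simp)
        have h2 : y % 10 = r % 10 := hv y (by simp)
        have h3 := ih v (by simpa using hlen) (fun z hz => hu z (by simp [hz]))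
          (fun z hz => hv z (by simp [hz]))
        simp only [List.sum_cons]
        omega

theorem pvCoreSubperm (arr : List Int) : (pvCore arr).Subperm arr := by
  rw [pvCore_eq]
  refine List.Subperm.trans ?_ ((pvPartition arr).symm.subperm)
  refine pvFlatMapSubperm _ _ _ ?_
  intro r _
  exact ((pvKeep_sublist arr r).subperm).trans (pvBucket_perm arr r).subperm

-- ===== the exchange argument =====

-- any 3-element sub-multiset of arr has a 3-element sub-multiset of the core
-- whose sum carries the same last digit
def pvM (t : List Int) (r : Int) : Nat := (t.filter (pvPred r)).length

def pvChoose (arr t : List Int) (r : Int) : List Int :=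
  if 0 ≤ t.sum then (pvBucket arr r).drop ((pvBucket arr r).length - pvM t r)
  else (pvBucket arr r).take (pvM t r)

-- any 3-element sub-multiset of arr has a 3-element sub-multiset of the core
-- whose sum carries the same last digit
theorem pvExchange (arr t : List Int) (ht : t.Subperm arr) (h3 : t.length = 3) :
    ∃ u : List Int, u.Subperm (pvCore arr) ∧ u.length = 3 ∧ pvDgt u.sum = pvDgt t.sum := by
  have htf : ∀ r : Int, (t.filter (pvPred r)).Subperm (pvBucket arr r) := fun r =>
    (List.Subperm.filter (pvPred r) ht).trans (pvBucket_perm arr r).symm.subperm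
  have hmle : ∀ r : Int, pvM t r ≤ (pvBucket arr r).length := fun r => (htf r).length_le
  have hm3 : ∀ r : Int, pvM t r ≤ 3 := fun r => by
    have h := List.length_filter_le (pvPred r) t
    unfold pvM
    omega
  have hclen : ∀ r : Int, (pvChoose arr t r).length = pvM t r := by
    intro r
    have := hmle r
    unfold pvChoose
    split
    · simp only [List.length_drop]
      omega
    · simp only [List.length_take]
      omega
  have hcsub : ∀ r : Int, (pvChoose arr t r).Sublist (pvBucket arr r) := by
    intro r
    unfold pvChoose
    split
    · exact List.drop_sublist _ _
    · exact List.take_sublist _ _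
  have hck : ∀ r : Int, (pvChoose arr t r).Subperm (pvKeep arr r) := by
    intro r
    unfold pvChoose
    split
    · exact (pvTopKeep arr r (pvM t r) (hm3 r)).subperm
    · exact (pvBotKeep arr r (pvM t r) (hm3 r)).subperm
  set R : List Int := [0, 1, 2, 3, 4, 5, 6, 7, 8, 9] with hR
  refine ⟨R.flatMap (pvChoose arr t), ?_, ?_, ?_⟩
  · rw [pvCore_eq]
    exact pvFlatMapSubperm _ _ _ (fun r _ => hck r)
  · have h1 : (R.flatMap (pvChoose arr t)).length
        = (R.flatMap (fun r => t.filter (pvPred r))).length :=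
      pvFlatMapLen _ _ _ (fun r _ => by rw [hclen r]; rfl)
    have h2 := (pvPartition t).length_eq
    rw [h1, ← h2, h3]
  · have hmod : (R.flatMap (pvChoose arr t)).sum % 10
        = (R.flatMap (fun r => t.filter (pvPred r))).sum % 10 := by
      refine pvFlatMapSumMod _ _ _ ?_
      intro r _
      refine pvSumModEq r _ _ (by rw [hclen r]; rfl) ?_ ?_
      · intro x hx
        have hr : PySem.Int.mod x 10 = r := pvBucket_res arr r ((hcsub r).mem hx)
        have hb0 : 0 ≤ r := by rw [← hr]; exact PySem.Int.mod_nonneg x (by norm_num)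
        have hb1 : r < 10 := by rw [← hr]; exact PySem.Int.mod_lt x (by norm_num)
        rw [← PySem.Int.mod_eq_emod_of_pos (a := x) (by norm_num : (0:Int) < 10), hr]
        omega
      · intro x hx
        have hr : PySem.Int.mod x 10 = r := by
          simpa [pvPred] using (List.mem_filter.mp hx).2
        have hb0 : 0 ≤ r := by rw [← hr]; exact PySem.Int.mod_nonneg x (by norm_num)
        have hb1 : r < 10 := by rw [← hr]; exact PySem.Int.mod_lt x (by norm_num)
        rw [← PySem.Int.mod_eq_emod_of_pos (a := x) (by norm_num : (0:Int) < 10), hr]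
        omega
    have hsumt : (R.flatMap (fun r => t.filter (pvPred r))).sum = t.sum :=
      ((pvPartition t).sum_eq).symm
    rw [hsumt] at hmod
    rcases le_or_gt 0 t.sum with hpos | hneg
    · have hge : t.sum ≤ (R.flatMap (pvChoose arr t)).sum := by
        rw [← hsumt]
        refine pvFlatMapSumLe _ _ _ ?_
        intro r _
        have hd := pvTopDom (htf r) (pvBucket_sorted arr r)
        unfold pvChoose
        rw [if_pos hpos]
        exact hd
      exact pvDgtEqPos hmod (by omega) hpos
    · have hle : (R.flatMap (pvChoose arr t)).sum ≤ t.sum := by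
        rw [← hsumt]
        refine pvFlatMapSumLe _ _ _ ?_
        intro r _
        have hd := pvBotDom (htf r) (pvBucket_sorted arr r)
        unfold pvChoose
        rw [if_neg (by omega : ¬ 0 ≤ t.sum)]
        exact hd
      exact pvDgtEqNeg hmod (by omega) hneg

-- any 3-element sub-multiset digit is ≤ sum_calc_alt arr
theorem pvCovAlt (arr t : List Int) (ht : t.Subperm arr) (h3 : t.length = 3) :
    pvDgt t.sum ≤ sum_calc_alt arr := by
  obtain ⟨u, hu, hu3, hud⟩ := pvExchange arr t ht h3
  obtain ⟨u', hperm, hsub⟩ := hu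
  obtain ⟨i, j, k, hij, hjk, hk, heq⟩ := pvTripleOfSublist _ _ hsub (by rw [hperm.length_eq]; exact hu3)
  have hsum : u.sum = (pvCore arr).getD i 0 + (pvCore arr).getD j 0 + (pvCore arr).getD k 0 := by
    rw [← hperm.sum_eq, heq]
    simp
    ring
  have hcov := pvCovBrute (pvCore arr) i j k (by omega)
    (by exact_mod_cast hij) (by exact_mod_cast hjk) (by exact_mod_cast hk)
  simp only [PySem.List.pyGetD_natCast] at hcov
  rw [← hsum, hud] at hcov
  exact hcov

-- any 3-element sub-multiset digit is ≤ sum_calc arr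
theorem pvCovASub (arr t : List Int) (ht : t.Subperm arr) (h3 : t.length = 3) :
    pvDgt t.sum ≤ sum_calc arr := by
  obtain ⟨t', hperm, hsub⟩ := ht
  obtain ⟨i, j, k, hij, hjk, hk, heq⟩ := pvTripleOfSublist _ _ hsub (by rw [hperm.length_eq]; exact h3)
  have hsum : t.sum = arr.getD i 0 + arr.getD j 0 + arr.getD k 0 := by
    rw [← hperm.sum_eq, heq]
    simp
    ring
  have hcov := pvCovA arr i j k
    (PySem.List.mem_pyRange_one.mpr (by constructor <;> [omega; exact_mod_cast (by omega : (i:Int) < (arr.length : Int))]))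
    (PySem.List.mem_pyRange_one.mpr (by constructor <;> [omega; exact_mod_cast (by omega : (j:Int) < (arr.length : Int))]))
    (PySem.List.mem_pyRange_one.mpr (by constructor <;> [omega; exact_mod_cast (by omega : (k:Int) < (arr.length : Int))]))
    (by exact_mod_cast (by omega : (i:Int) ≠ j)) (by exact_mod_cast (by omega : (i:Int) ≠ k))
    (by exact_mod_cast (by omega : (j:Int) ≠ k))
  simp only [PySem.List.pyGetD_natCast] at hcov
  rw [← hsum] at hcov
  exact hcov

-- sorted-index form of the A-side candidate, as a sub-multiset of arr
theorem pvTripleSubpermOfDistinct (arr : List Int) (i j k : Int)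
    (hi0 : 0 ≤ i) (hi : i < (arr.length : Int)) (hj0 : 0 ≤ j) (hj : j < (arr.length : Int))
    (hk0 : 0 ≤ k) (hk : k < (arr.length : Int)) (hij : i ≠ j) (hik : i ≠ k) (hjk : j ≠ k) :
    ∃ t : List Int, t.Subperm arr ∧ t.length = 3 ∧
      t.sum = PySem.List.pyGetD arr i 0 + PySem.List.pyGetD arr j 0 + PySem.List.pyGetD arr k 0 := by
  set a := i.toNat with ha
  set b := j.toNat with hb
  set c := k.toNat with hc
  have hga : PySem.List.pyGetD arr i 0 = arr.getD a 0 := by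
    rw [show i = (a : Int) by omega, PySem.List.pyGetD_natCast]
  have hgb : PySem.List.pyGetD arr j 0 = arr.getD b 0 := by
    rw [show j = (b : Int) by omega, PySem.List.pyGetD_natCast]
  have hgc : PySem.List.pyGetD arr k 0 = arr.getD c 0 := by
    rw [show k = (c : Int) by omega, PySem.List.pyGetD_natCast]
  -- sort {a,b,c} into increasing order and use the corresponding sublist
  have hab : a ≠ b := by omega
  have hac : a ≠ c := by omega
  have hbc : b ≠ c := by omega
  have hca : c < arr.length := by omega
  have haa : a < arr.length := by omega
  have hba : b < arr.length := by omega
  rcases lt_or_gt_of_ne hab with h1 | h1 <;> rcases lt_or_gt_of_ne hac with h2 | h2 <;>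
    rcases lt_or_gt_of_ne hbc with h3 | h3
  · exact ⟨[arr.getD a 0, arr.getD b 0, arr.getD c 0],
      (pvSublistOfTriple arr a b c h1 h3 hca).subperm, rfl, by simp [hga, hgb, hgc]; ring⟩
  · exact ⟨[arr.getD a 0, arr.getD c 0, arr.getD b 0],
      (pvSublistOfTriple arr a c b h2 (by omega) hba).subperm, rfl, by simp [hga, hgb, hgc]; ring⟩
  · omega
  · exact ⟨[arr.getD c 0, arr.getD a 0, arr.getD b 0],
      (pvSublistOfTriple arr c a b (by omega) h1 hba).subperm, rfl, by simp [hga, hgb, hgc]; ring⟩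
  · exact ⟨[arr.getD b 0, arr.getD a 0, arr.getD c 0],
      (pvSublistOfTriple arr b a c (by omega) h2 hca).subperm, rfl, by simp [hga, hgb, hgc]; ring⟩
  · omega
  · exact ⟨[arr.getD b 0, arr.getD c 0, arr.getD a 0],
      (pvSublistOfTriple arr b c a h3 (by omega) haa).subperm, rfl, by simp [hga, hgb, hgc]; ring⟩
  · exact ⟨[arr.getD c 0, arr.getD b 0, arr.getD a 0],
      (pvSublistOfTriple arr c b a (by omega) (by omega) haa).subperm, rfl, by simp [hga, hgb, hgc]; ring⟩

theorem pvALeB (arr : List Int) : sum_calc arr ≤ sum_calc_alt arr := by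
  have h0 : (0 : Int) ≤ sum_calc_alt arr := pvBruteNonneg (pvCore arr)
  unfold sum_calc
  refine pvFoldlLe _ _ _ 0 h0 ?_
  intro acc i hi hacc
  refine pvFoldlLe _ _ _ acc hacc ?_
  intro acc2 j hj hacc2
  show (if i ≠ j then _ else acc2) ≤ _
  split
  · rename_i hij
    refine pvFoldlLe _ _ _ acc2 hacc2 ?_
    intro acc3 k hk hacc3
    show (if i ≠ k ∧ j ≠ k then _ else acc3) ≤ _
    split
    · rename_i hg
      show (if (match PySem.Str.pyGet? (PySem.Int.toStr
          (PySem.List.pyGetD arr i 0 + PySem.List.pyGetD arr j 0 + PySem.List.pyGetD arr k 0))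
          (-1) with
          | some c => (PySem.Int.ofChars? [c]).getD 0
          | none => 0) > acc3 then _ else acc3) ≤ _
      rw [pvTmpA_eq]
      rw [PySem.List.mem_pyRange_one] at hi hj hk
      obtain ⟨t, hsp, h3, hsum⟩ := pvTripleSubpermOfDistinct arr i j k
        (by omega) (by omega) (by omega) (by omega) (by omega) (by omega) hij hg.1 hg.2
      have hcov := pvCovAlt arr t hsp h3
      rw [hsum] at hcov
      split <;> omega
    · exact hacc3
  · exact hacc2

theorem pvBLeA (arr : List Int) : sum_calc_alt arr ≤ sum_calc arr := by
  unfold sum_calc_alt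
  refine pvBruteLe (pvCore arr) (sum_calc arr) (pvANonneg arr) ?_
  intro i j k h0 hij hjk hk
  set a := i.toNat
  set b := j.toNat
  set c := k.toNat
  have hga : PySem.List.pyGetD (pvCore arr) i 0 = (pvCore arr).getD a 0 := by
    rw [show i = (a : Int) by omega, PySem.List.pyGetD_natCast]
  have hgb : PySem.List.pyGetD (pvCore arr) j 0 = (pvCore arr).getD b 0 := by
    rw [show j = (b : Int) by omega, PySem.List.pyGetD_natCast]
  have hgc : PySem.List.pyGetD (pvCore arr) k 0 = (pvCore arr).getD c 0 := by
    rw [show k = (c : Int) by omega, PySem.List.pyGetD_natCast]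
  rw [hga, hgb, hgc]
  have hsub : [(pvCore arr).getD a 0, (pvCore arr).getD b 0, (pvCore arr).getD c 0].Sublist (pvCore arr) := by
    refine pvSublistOfTriple (pvCore arr) a b c (by omega) (by omega) ?_
    omega
  have hsp : [(pvCore arr).getD a 0, (pvCore arr).getD b 0, (pvCore arr).getD c 0].Subperm arr :=
    hsub.subperm.trans (pvCoreSubperm arr)
  have hcov := pvCovASub arr _ hsp rfl
  simp only [List.sum_cons, List.sum_nil, add_zero] at hcov
  have : (pvCore arr).getD a 0 + (pvCore arr).getD b 0 + (pvCore arr).getD c 0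
      = (pvCore arr).getD a 0 + ((pvCore arr).getD b 0 + ((pvCore arr).getD c 0 + 0)) := by ring
  rw [this]
  simpa using hcov

-- ===== VERDICT (by name: the statement is the Claim_ definition above) =====
theorem sum_calc_spec : Claim_equal_sum_calc := by
  intro arr _
  unfold Spec_sum_calc
  exact le_antisymm (pvALeB arr) (pvBLeA arr)
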